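-- pv_equiv track=rewrite | github.com/lexmoraes/hello-world | python/EstructLogic/Exercicios_algoritmos_python/ex103-listas_impar_par.py | impar_par
-- ===== SOURCE A (Python) =====
-- def impar_par(numeros):
--     impar = []
--     par = []
--     nulos = 0
--
--     for n in numeros:
--         if n % 2 == 0 and n != 0:
--             par.append(n)
--         elif n == 0:
--             nulos += 1
--         else:
--             impar.append(n)
--     return impar, par, nulos
-- ===== SOURCE B (Python) =====
-- def impar_par(numeros):
--     nums = list(numeros)
--     impar = [n for n in nums if n % 2 != 0]
--     par = [n for n in nums if n % 2 == 0 and n != 0]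
--     nulos = sum(1 for n in nums if n == 0)
--     return impar, par, nulos
-- ===== Notes on version B (the rewrite author's own statement) =====
-- stated objective: idiomatic
-- what changed: Replaces the single classifying loop with mutable accumulators by three independent filtering passes (two comprehensions and a sum) over the materialized input.
import Mathlib
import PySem

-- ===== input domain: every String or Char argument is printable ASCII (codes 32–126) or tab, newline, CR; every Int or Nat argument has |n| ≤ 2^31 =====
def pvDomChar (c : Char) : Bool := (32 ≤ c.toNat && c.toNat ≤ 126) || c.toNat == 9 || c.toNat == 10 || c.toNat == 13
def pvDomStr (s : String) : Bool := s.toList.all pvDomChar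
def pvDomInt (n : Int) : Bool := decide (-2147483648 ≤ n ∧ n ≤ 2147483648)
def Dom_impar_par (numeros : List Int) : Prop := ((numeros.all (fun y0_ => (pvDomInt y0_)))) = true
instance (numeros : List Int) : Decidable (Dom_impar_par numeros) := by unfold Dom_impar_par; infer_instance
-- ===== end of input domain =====

-- ===== PORT A =====
-- A: one loop classifying each element into (impar, par, nulos)
def impar_par (numeros : List Int) : List Int × List Int × Int :=
  numeros.foldl
    (fun st n =>
      if PySem.Int.mod n 2 = 0 ∧ n ≠ 0 then (st.1, st.2.1 ++ [n], st.2.2)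
      else if n = 0 then (st.1, st.2.1, st.2.2 + 1)
      else (st.1 ++ [n], st.2.1, st.2.2))
    ([], [], 0)

-- ===== PORT B =====
-- B: three independent filtering passes (header: same value, different decomposition; no speed claim)
def impar_par_alt (numeros : List Int) : List Int × List Int × Int :=
  (numeros.filter (fun n => PySem.Int.mod n 2 ≠ 0),
   numeros.filter (fun n => PySem.Int.mod n 2 = 0 ∧ n ≠ 0),
   ((numeros.filter (fun n => n = 0)).length : Int))

-- ===== PRECONDITION & SPEC =====
def Spec_impar_par (numeros : List Int) (out : List Int × List Int × Int) : Prop := out = impar_par_alt numeros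
instance (numeros : List Int) (out : List Int × List Int × Int) : Decidable (Spec_impar_par numeros out) := by unfold Spec_impar_par; infer_instance

-- ===== CLAIM (what is proved, stated in full; the proofs are below) =====
def Claim_equal_impar_par : Prop := ∀ (numeros : List Int), Dom_impar_par numeros → Spec_impar_par numeros (impar_par numeros)

-- ===== LEMMAS AND PROOFS =====

-- ===== VERDICT (by name: the statement is the Claim_ definition above) =====
theorem foldA_char (l : List Int) : ∀ (i p : List Int) (z : Int),
    l.foldl
      (fun st n =>
        if PySem.Int.mod n 2 = 0 ∧ n ≠ 0 then (st.1, st.2.1 ++ [n], st.2.2)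
        else if n = 0 then (st.1, st.2.1, st.2.2 + 1)
        else (st.1 ++ [n], st.2.1, st.2.2))
      (i, p, z)
    = (i ++ l.filter (fun n => PySem.Int.mod n 2 ≠ 0),
       p ++ l.filter (fun n => PySem.Int.mod n 2 = 0 ∧ n ≠ 0),
       z + ((l.filter (fun n => n = 0)).length : Int)) := by
  induction l with
  | nil => intro i p z; simp
  | cons x xs ih =>
    intro i p z
    simp only [List.foldl_cons, List.filter_cons]
    by_cases h1 : PySem.Int.mod x 2 = 0 ∧ x ≠ 0
    · have hd : (2:Int) ∣ x := by simpa using h1.1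
      rw [if_pos h1, ih, if_neg (by simp [hd]), if_pos (by simp [hd, h1.2]),
        if_neg (by simp [h1.2])]
      simp [List.append_assoc]
    · by_cases h2 : x = 0
      · have hm : PySem.Int.mod x 2 = 0 := by subst h2; decide
        have hd : (2:Int) ∣ x := by simpa using hm
        rw [if_neg h1, if_pos h2, ih, if_neg (by simp [hd]), if_neg (by simp [h2]),
          if_pos (by simp [h2])]
        simp [List.length_cons]
        ring
      · have hm : PySem.Int.mod x 2 ≠ 0 := fun h => h1 ⟨h, h2⟩
        have hnd : ¬ (2:Int) ∣ x := by simpa using hm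
        rw [if_neg h1, if_neg h2, ih, if_pos (by simp [hnd]), if_neg (by simp [hnd]),
          if_neg (by simp [h2])]
        simp [List.append_assoc]

theorem impar_par_spec : Claim_equal_impar_par := by
  intro numeros _
  unfold Spec_impar_par impar_par impar_par_alt
  rw [foldA_char]
  simp only [List.nil_append, zero_add]
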